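-- pv_equiv track=rewrite | github.com/basicmicro/basicmicro_python | bump_version.py | determine_bump_type
-- ===== SOURCE A (Python) =====
-- def determine_bump_type(commits):
--     """Determine bump type based on conventional commit messages"""
--     has_breaking = any("!" in commit for commit in commits)
--     has_feat = any("feat:" in commit or "feat(" in commit for commit in commits)
--     has_fix_or_perf = any(
--         any(keyword in commit for keyword in ["fix:", "fix(", "perf:", "perf("])
--         for commit in commits
--     )
--
--     if has_breaking:
--         return "major"
--     elif has_feat:
--         return "minor"
--     elif has_fix_or_perf:
--         return "patch"
--     else:
--         return None  # No version bump needed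
-- ===== SOURCE B (Python) =====
-- def determine_bump_type(commits):
--     """Determine bump type based on conventional commit messages"""
--     def rank(commit):
--         if "!" in commit:
--             return 3
--         if "feat:" in commit or "feat(" in commit:
--             return 2
--         if "fix:" in commit or "fix(" in commit or "perf:" in commit or "perf(" in commit:
--             return 1
--         return 0
--
--     best = 0
--     for commit in commits:
--         r = rank(commit)
--         if r > best:
--             best = r
--             if best == 3:
--                 break
--     if best == 3:
--         return "major"
--     if best == 2:
--         return "minor"
--     if best == 1:
--         return "patch"
--     return None
-- ===== Notes on version B (the rewrite author's own statement) =====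
-- stated objective: faster
-- what changed: Replaces the three independent any() scans over the whole list by a single pass that scores each commit (3/2/1/0) and keeps the running maximum with an early break once a breaking change is seen, then maps the maximum score to the bump name.
import Mathlib
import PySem

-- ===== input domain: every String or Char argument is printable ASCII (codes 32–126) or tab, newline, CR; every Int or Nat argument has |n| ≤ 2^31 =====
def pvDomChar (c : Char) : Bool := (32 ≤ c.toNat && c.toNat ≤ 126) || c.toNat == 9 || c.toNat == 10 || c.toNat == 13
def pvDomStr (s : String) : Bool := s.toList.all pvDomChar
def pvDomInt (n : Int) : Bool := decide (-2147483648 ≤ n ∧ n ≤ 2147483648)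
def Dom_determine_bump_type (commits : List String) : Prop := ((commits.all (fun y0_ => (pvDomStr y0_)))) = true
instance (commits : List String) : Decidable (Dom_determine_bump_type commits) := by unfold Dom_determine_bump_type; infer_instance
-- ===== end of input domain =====

-- B replaces A's three full any() scans by one pass scoring each commit and keeping the running maximum (alternative decomposition).

-- ===== PORT A =====
def determine_bump_type (commits : List String) : Option String :=
  let has_breaking := commits.any (fun commit => PySem.Str.isIn "!" commit)
  let has_feat := commits.any (fun commit =>
    PySem.Str.isIn "feat:" commit || PySem.Str.isIn "feat(" commit)
  let has_fix_or_perf := commits.any (fun commit =>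
    (["fix:", "fix(", "perf:", "perf("] : List String).any (fun keyword => PySem.Str.isIn keyword commit))
  if has_breaking then some "major"
  else if has_feat then some "minor"
  else if has_fix_or_perf then some "patch"
  else none

-- ===== PORT B =====
def pvRank (commit : String) : Nat :=
  if PySem.Str.isIn "!" commit then 3
  else if PySem.Str.isIn "feat:" commit || PySem.Str.isIn "feat(" commit then 2
  else if PySem.Str.isIn "fix:" commit || PySem.Str.isIn "fix(" commit ||
          PySem.Str.isIn "perf:" commit || PySem.Str.isIn "perf(" commit then 1
  else 0

-- the 'for commit in commits' loop with its early break at best == 3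
def pvLoop : List String → Nat → Nat
  | [], best => best
  | commit :: rest, best =>
    let r := pvRank commit
    let best' := if r > best then r else best
    if best' == 3 then best' else pvLoop rest best'

def determine_bump_type_alt (commits : List String) : Option String :=
  let best := pvLoop commits 0
  if best == 3 then some "major"
  else if best == 2 then some "minor"
  else if best == 1 then some "patch"
  else none

-- ===== PRECONDITION & SPEC =====
def Spec_determine_bump_type (commits : List String) (out : Option String) : Prop := out = determine_bump_type_alt commits
instance (commits : List String) (out : Option String) : Decidable (Spec_determine_bump_type commits out) := by unfold Spec_determine_bump_type; infer_instance

-- ===== CLAIM (what is proved, stated in full; the proofs are below) =====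
def Claim_equal_determine_bump_type : Prop := ∀ (commits : List String), Dom_determine_bump_type commits → Spec_determine_bump_type commits (determine_bump_type commits)

-- ===== LEMMAS AND PROOFS =====

theorem pvRank_le (c : String) : pvRank c ≤ 3 := by
  unfold pvRank; split_ifs <;> omega

-- pvLoop computes max best (max of ranks): the early break at 3 is value-preserving since ranks are <= 3
theorem foldr_rank_le (cs : List String) :
    cs.foldr (fun c a => max (pvRank c) a) 0 ≤ 3 := by
  induction cs with
  | nil => simp
  | cons c rest ih =>
    have := pvRank_le c
    simp only [List.foldr_cons]
    omega

theorem pvLoop_eq (cs : List String) : ∀ (b : Nat), b ≤ 3 →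
    pvLoop cs b = max b (cs.foldr (fun c a => max (pvRank c) a) 0) := by
  induction cs with
  | nil => intro b _; simp [pvLoop]
  | cons c rest ih =>
    intro b hb
    have hr := pvRank_le c
    have hm := foldr_rank_le rest
    simp only [pvLoop, List.foldr_cons]
    by_cases h : (if pvRank c > b then pvRank c else b) = 3
    · rw [if_pos (by simp [h])]
      split_ifs at h ⊢ <;> omega
    · rw [if_neg (by simp [h]), ih _ (by split_ifs <;> omega)]
      split_ifs at h ⊢ <;> omega

-- B's rank function written with A's exact per-commit tests (keyword list vs or-chain)
theorem pvRank_eq (c : String) :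
    pvRank c =
      (if PySem.Str.isIn "!" c then 3
       else if PySem.Str.isIn "feat:" c || PySem.Str.isIn "feat(" c then 2
       else if (["fix:", "fix(", "perf:", "perf("] : List String).any (fun keyword => PySem.Str.isIn keyword c) then 1
       else 0) := by
  unfold pvRank
  simp [Bool.or_assoc]

-- characterisation of the maximum rank by the three any-scans of A
theorem foldr_rank_char (cs : List String) :
    cs.foldr (fun c a => max (pvRank c) a) 0 =
      (if cs.any (fun commit => PySem.Str.isIn "!" commit) then 3
       else if cs.any (fun commit => PySem.Str.isIn "feat:" commit || PySem.Str.isIn "feat(" commit) then 2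
       else if cs.any (fun commit =>
          (["fix:", "fix(", "perf:", "perf("] : List String).any (fun keyword => PySem.Str.isIn keyword commit)) then 1
       else 0) := by
  induction cs with
  | nil => simp
  | cons c rest ih =>
    simp only [List.foldr_cons]
    rw [ih, pvRank_eq, List.any_cons (l := rest), List.any_cons (l := rest), List.any_cons (l := rest)]
    cases h1 : PySem.Str.isIn "!" c <;>
    cases h2 : (PySem.Str.isIn "feat:" c || PySem.Str.isIn "feat(" c) <;>
    cases h3 : ((["fix:", "fix(", "perf:", "perf("] : List String).any (fun keyword => PySem.Str.isIn keyword c)) <;>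
    cases r1 : rest.any (fun commit => PySem.Str.isIn "!" commit) <;>
    cases r2 : rest.any (fun commit => PySem.Str.isIn "feat:" commit || PySem.Str.isIn "feat(" commit) <;>
    cases r3 : rest.any (fun commit =>
        (["fix:", "fix(", "perf:", "perf("] : List String).any (fun keyword => PySem.Str.isIn keyword commit)) <;>
    rfl

-- ===== VERDICT (by name: the statement is the Claim_ definition above) =====
theorem determine_bump_type_spec : Claim_equal_determine_bump_type := by
  intro commits _
  unfold Spec_determine_bump_type determine_bump_type determine_bump_type_alt
  rw [pvLoop_eq commits 0 (by omega), foldr_rank_char]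
  cases r1 : commits.any (fun commit => PySem.Str.isIn "!" commit) <;>
  cases r2 : commits.any (fun commit => PySem.Str.isIn "feat:" commit || PySem.Str.isIn "feat(" commit) <;>
  cases r3 : commits.any (fun commit =>
      (["fix:", "fix(", "perf:", "perf("] : List String).any (fun keyword => PySem.Str.isIn keyword commit)) <;>
  rfl
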